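-- pv_equiv track=rewrite | github.com/mahmoudmayaleh/Git_commit_Multi_agent | .history/agents/summary_agent_20251127003738.py | _group_bullet_points
-- ===== SOURCE A (Python) =====
-- from typing import List, Optional
--
-- def _group_bullet_points(bullets: List[str]) -> dict:
--     """
--     Group bullet points by category.
--
--     Args:
--         bullets: List of bullet points
--
--     Returns:
--         Dictionary of grouped bullet points
--     """
--     groups = {
--         "features": [],
--         "fixes": [],
--         "refactoring": [],
--         "dependencies": [],
--         "configuration": [],
--         "documentation": [],
--         "tests": [],
--         "other": []
--     }
--
--     for bullet in bullets:
--         bullet_lower = bullet.lower()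
--
--         # Categorize based on keywords
--         if any(kw in bullet_lower for kw in ["add", "new", "implement", "create"]):
--             groups["features"].append(bullet)
--         elif any(kw in bullet_lower for kw in ["fix", "bug", "issue", "error"]):
--             groups["fixes"].append(bullet)
--         elif any(kw in bullet_lower for kw in ["refactor", "restructure", "reorganize", "rename"]):
--             groups["refactoring"].append(bullet)
--         elif any(kw in bullet_lower for kw in ["dependency", "package", "requirement", "version"]):
--             groups["dependencies"].append(bullet)
--         elif any(kw in bullet_lower for kw in ["config", "setting", ".env", "yml", "json"]):
--             groups["configuration"].append(bullet)
--         elif any(kw in bullet_lower for kw in ["doc", "readme", "comment"]):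
--             groups["documentation"].append(bullet)
--         elif any(kw in bullet_lower for kw in ["test", "spec", "mock"]):
--             groups["tests"].append(bullet)
--         else:
--             groups["other"].append(bullet)
--
--     # Remove empty groups
--     return {k: v for k, v in groups.items() if v}
-- ===== SOURCE B (Python) =====
-- from typing import List
--
-- _TABLE = [
--     ("features", ["add", "new", "implement", "create"]),
--     ("fixes", ["fix", "bug", "issue", "error"]),
--     ("refactoring", ["refactor", "restructure", "reorganize", "rename"]),
--     ("dependencies", ["dependency", "package", "requirement", "version"]),
--     ("configuration", ["config", "setting", ".env", "yml", "json"]),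
--     ("documentation", ["doc", "readme", "comment"]),
--     ("tests", ["test", "spec", "mock"]),
-- ]
--
-- def _category(bullet: str) -> str:
--     bl = bullet.lower()
--     return next((name for name, kws in _TABLE if any(kw in bl for kw in kws)), "other")
--
-- def _group_bullet_points(bullets: List[str]) -> dict:
--     tagged = [(b, _category(b)) for b in bullets]
--     names = [name for name, _ in _TABLE] + ["other"]
--     out = {n: [b for b, c in tagged if c == n] for n in names}
--     return {k: v for k, v in out.items() if v}
-- ===== Notes on version B (the rewrite author's own statement) =====
-- stated objective: simpler
-- what changed: Replaces the 8-way if/elif append loop over a pre-built dict with a data-driven keyword table: a _category lookup via next() over the table tags each bullet once, and the result is built as one dict comprehension grouping the tagged bullets per category, then dropping empty groups.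
import Mathlib
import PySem

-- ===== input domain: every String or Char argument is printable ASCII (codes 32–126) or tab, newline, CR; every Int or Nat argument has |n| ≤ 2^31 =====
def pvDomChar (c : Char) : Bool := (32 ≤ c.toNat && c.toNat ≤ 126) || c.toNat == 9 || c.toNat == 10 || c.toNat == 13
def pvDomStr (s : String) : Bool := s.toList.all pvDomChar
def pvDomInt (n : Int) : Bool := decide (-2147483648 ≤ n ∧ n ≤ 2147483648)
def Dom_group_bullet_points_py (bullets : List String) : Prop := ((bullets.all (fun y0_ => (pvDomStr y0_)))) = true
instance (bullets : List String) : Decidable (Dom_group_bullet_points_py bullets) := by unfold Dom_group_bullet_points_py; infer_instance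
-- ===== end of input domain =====

-- B replaces A's if/elif cascade over a pre-built dict with a keyword table and a per-category
-- filter comprehension; same exact behaviour, judged simpler/data-driven (no speed claim).

-- ===== PORT A =====
-- one loop step of A: lower the bullet, then the if/elif keyword cascade appending to the dict
def pvStepA (g : PySem.Dict String (List String)) (bullet : String) : PySem.Dict String (List String) :=
  let bl := PySem.Str.lower bullet
  if (["add", "new", "implement", "create"]).any (fun kw => PySem.Str.isIn kw bl) then
    g.modify "features" [] (· ++ [bullet])
  else if (["fix", "bug", "issue", "error"]).any (fun kw => PySem.Str.isIn kw bl) then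
    g.modify "fixes" [] (· ++ [bullet])
  else if (["refactor", "restructure", "reorganize", "rename"]).any (fun kw => PySem.Str.isIn kw bl) then
    g.modify "refactoring" [] (· ++ [bullet])
  else if (["dependency", "package", "requirement", "version"]).any (fun kw => PySem.Str.isIn kw bl) then
    g.modify "dependencies" [] (· ++ [bullet])
  else if (["config", "setting", ".env", "yml", "json"]).any (fun kw => PySem.Str.isIn kw bl) then
    g.modify "configuration" [] (· ++ [bullet])
  else if (["doc", "readme", "comment"]).any (fun kw => PySem.Str.isIn kw bl) then
    g.modify "documentation" [] (· ++ [bullet])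
  else if (["test", "spec", "mock"]).any (fun kw => PySem.Str.isIn kw bl) then
    g.modify "tests" [] (· ++ [bullet])
  else
    g.modify "other" [] (· ++ [bullet])

def group_bullet_points_py (bullets : List String) : List (String × List String) :=
  let groups : PySem.Dict String (List String) := PySem.Dict.ofList
    [("features", []), ("fixes", []), ("refactoring", []), ("dependencies", []),
     ("configuration", []), ("documentation", []), ("tests", []), ("other", [])]
  let groups := bullets.foldl pvStepA groups
  -- {k: v for k, v in groups.items() if v}
  (groups.items).filter (fun kv => decide (kv.2 ≠ []))

-- ===== PORT B =====
def pvTable : List (String × List String) :=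
  [("features", ["add", "new", "implement", "create"]),
   ("fixes", ["fix", "bug", "issue", "error"]),
   ("refactoring", ["refactor", "restructure", "reorganize", "rename"]),
   ("dependencies", ["dependency", "package", "requirement", "version"]),
   ("configuration", ["config", "setting", ".env", "yml", "json"]),
   ("documentation", ["doc", "readme", "comment"]),
   ("tests", ["test", "spec", "mock"])]

-- next((name for name, kws in _TABLE if any(kw in bl for kw in kws)), "other")
def pvCategory (bullet : String) : String :=
  let bl := PySem.Str.lower bullet
  ((pvTable.find? (fun nk => nk.2.any (fun kw => PySem.Str.isIn kw bl))).map (·.1)).getD "other"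

def group_bullet_points_py_alt (bullets : List String) : List (String × List String) :=
  let tagged := bullets.map (fun b => (b, pvCategory b))
  let names := pvTable.map (·.1) ++ ["other"]
  let out := names.map (fun n => (n, (tagged.filter (fun bc => bc.2 == n)).map (·.1)))
  out.filter (fun kv => decide (kv.2 ≠ []))

-- ===== PRECONDITION & SPEC =====
def Spec_group_bullet_points_py (bullets : List String) (out : List (String × List String)) : Prop := out = group_bullet_points_py_alt bullets
instance (bullets : List String) (out : List (String × List String)) : Decidable (Spec_group_bullet_points_py bullets out) := by unfold Spec_group_bullet_points_py; infer_instance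

-- ===== CLAIM (what is proved, stated in full; the proofs are below) =====
def Claim_equal_group_bullet_points_py : Prop := ∀ (bullets : List String), Dom_group_bullet_points_py bullets → Spec_group_bullet_points_py bullets (group_bullet_points_py bullets)

-- ===== LEMMAS AND PROOFS =====

lemma pvIns_features (f x r d c doc t o v : List String) :
    (PySem.Dict.mk [("features", f), ("fixes", x), ("refactoring", r), ("dependencies", d), ("configuration", c), ("documentation", doc), ("tests", t), ("other", o)]).insert "features" v = PySem.Dict.mk [("features", v), ("fixes", x), ("refactoring", r), ("dependencies", d), ("configuration", c), ("documentation", doc), ("tests", t), ("other", o)] := by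
  apply PySem.Dict.ext
  simp [PySem.Dict.items_insert]

lemma pvIns_fixes (f x r d c doc t o v : List String) :
    (PySem.Dict.mk [("features", f), ("fixes", x), ("refactoring", r), ("dependencies", d), ("configuration", c), ("documentation", doc), ("tests", t), ("other", o)]).insert "fixes" v = PySem.Dict.mk [("features", f), ("fixes", v), ("refactoring", r), ("dependencies", d), ("configuration", c), ("documentation", doc), ("tests", t), ("other", o)] := by
  apply PySem.Dict.ext
  simp [PySem.Dict.items_insert]

lemma pvIns_refactoring (f x r d c doc t o v : List String) :
    (PySem.Dict.mk [("features", f), ("fixes", x), ("refactoring", r), ("dependencies", d), ("configuration", c), ("documentation", doc), ("tests", t), ("other", o)]).insert "refactoring" v = PySem.Dict.mk [("features", f), ("fixes", x), ("refactoring", v), ("dependencies", d), ("configuration", c), ("documentation", doc), ("tests", t), ("other", o)] := by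
  apply PySem.Dict.ext
  simp [PySem.Dict.items_insert]

lemma pvIns_dependencies (f x r d c doc t o v : List String) :
    (PySem.Dict.mk [("features", f), ("fixes", x), ("refactoring", r), ("dependencies", d), ("configuration", c), ("documentation", doc), ("tests", t), ("other", o)]).insert "dependencies" v = PySem.Dict.mk [("features", f), ("fixes", x), ("refactoring", r), ("dependencies", v), ("configuration", c), ("documentation", doc), ("tests", t), ("other", o)] := by
  apply PySem.Dict.ext
  simp [PySem.Dict.items_insert]

lemma pvIns_configuration (f x r d c doc t o v : List String) :
    (PySem.Dict.mk [("features", f), ("fixes", x), ("refactoring", r), ("dependencies", d), ("configuration", c), ("documentation", doc), ("tests", t), ("other", o)]).insert "configuration" v = PySem.Dict.mk [("features", f), ("fixes", x), ("refactoring", r), ("dependencies", d), ("configuration", v), ("documentation", doc), ("tests", t), ("other", o)] := by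
  apply PySem.Dict.ext
  simp [PySem.Dict.items_insert]

lemma pvIns_documentation (f x r d c doc t o v : List String) :
    (PySem.Dict.mk [("features", f), ("fixes", x), ("refactoring", r), ("dependencies", d), ("configuration", c), ("documentation", doc), ("tests", t), ("other", o)]).insert "documentation" v = PySem.Dict.mk [("features", f), ("fixes", x), ("refactoring", r), ("dependencies", d), ("configuration", c), ("documentation", v), ("tests", t), ("other", o)] := by
  apply PySem.Dict.ext
  simp [PySem.Dict.items_insert]

lemma pvIns_tests (f x r d c doc t o v : List String) :
    (PySem.Dict.mk [("features", f), ("fixes", x), ("refactoring", r), ("dependencies", d), ("configuration", c), ("documentation", doc), ("tests", t), ("other", o)]).insert "tests" v = PySem.Dict.mk [("features", f), ("fixes", x), ("refactoring", r), ("dependencies", d), ("configuration", c), ("documentation", doc), ("tests", v), ("other", o)] := by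
  apply PySem.Dict.ext
  simp [PySem.Dict.items_insert]

lemma pvIns_other (f x r d c doc t o v : List String) :
    (PySem.Dict.mk [("features", f), ("fixes", x), ("refactoring", r), ("dependencies", d), ("configuration", c), ("documentation", doc), ("tests", t), ("other", o)]).insert "other" v = PySem.Dict.mk [("features", f), ("fixes", x), ("refactoring", r), ("dependencies", d), ("configuration", c), ("documentation", doc), ("tests", t), ("other", v)] := by
  apply PySem.Dict.ext
  simp [PySem.Dict.items_insert]

-- the loop of A, started from an arbitrary 8-key dict, appends each bullet to its category's list
lemma pvLoopA (l : List String) (f x r d c doc t o : List String) :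
    l.foldl pvStepA (PySem.Dict.mk
      [("features", f), ("fixes", x), ("refactoring", r), ("dependencies", d),
       ("configuration", c), ("documentation", doc), ("tests", t), ("other", o)]) =
    PySem.Dict.mk
      [("features", f ++ l.filter (fun b => pvCategory b == "features")),
       ("fixes", x ++ l.filter (fun b => pvCategory b == "fixes")),
       ("refactoring", r ++ l.filter (fun b => pvCategory b == "refactoring")),
       ("dependencies", d ++ l.filter (fun b => pvCategory b == "dependencies")),
       ("configuration", c ++ l.filter (fun b => pvCategory b == "configuration")),
       ("documentation", doc ++ l.filter (fun b => pvCategory b == "documentation")),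
       ("tests", t ++ l.filter (fun b => pvCategory b == "tests")),
       ("other", o ++ l.filter (fun b => pvCategory b == "other"))] := by
  induction l generalizing f x r d c doc t o with
  | nil => simp
  | cons b l ih =>
    simp only [List.foldl_cons, List.filter_cons]
    by_cases h1 : (["add", "new", "implement", "create"]).any (fun kw => PySem.Str.isIn kw (PySem.Str.lower b)) = true
    · simp at h1
      simp [pvStepA, pvCategory, pvTable, PySem.Dict.modify, pvIns_features, pvIns_fixes, pvIns_refactoring, pvIns_dependencies, pvIns_configuration, pvIns_documentation, pvIns_tests, pvIns_other, PySem.Dict.items_insert, PySem.Dict.getD_eq_get?_getD, PySem.Dict.get?_mk_cons, PySem.Dict.ext_iff, h1, ih]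
    ·
      by_cases h2 : (["fix", "bug", "issue", "error"]).any (fun kw => PySem.Str.isIn kw (PySem.Str.lower b)) = true
      · simp at h1 h2
        simp [pvStepA, pvCategory, pvTable, PySem.Dict.modify, pvIns_features, pvIns_fixes, pvIns_refactoring, pvIns_dependencies, pvIns_configuration, pvIns_documentation, pvIns_tests, pvIns_other, PySem.Dict.items_insert, PySem.Dict.getD_eq_get?_getD, PySem.Dict.get?_mk_cons, PySem.Dict.ext_iff, h1, h2, ih]
      ·
        by_cases h3 : (["refactor", "restructure", "reorganize", "rename"]).any (fun kw => PySem.Str.isIn kw (PySem.Str.lower b)) = true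
        · simp at h1 h2 h3
          simp [pvStepA, pvCategory, pvTable, PySem.Dict.modify, pvIns_features, pvIns_fixes, pvIns_refactoring, pvIns_dependencies, pvIns_configuration, pvIns_documentation, pvIns_tests, pvIns_other, PySem.Dict.items_insert, PySem.Dict.getD_eq_get?_getD, PySem.Dict.get?_mk_cons, PySem.Dict.ext_iff, h1, h2, h3, ih]
        ·
          by_cases h4 : (["dependency", "package", "requirement", "version"]).any (fun kw => PySem.Str.isIn kw (PySem.Str.lower b)) = true
          · simp at h1 h2 h3 h4
            simp [pvStepA, pvCategory, pvTable, PySem.Dict.modify, pvIns_features, pvIns_fixes, pvIns_refactoring, pvIns_dependencies, pvIns_configuration, pvIns_documentation, pvIns_tests, pvIns_other, PySem.Dict.items_insert, PySem.Dict.getD_eq_get?_getD, PySem.Dict.get?_mk_cons, PySem.Dict.ext_iff, h1, h2, h3, h4, ih]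
          ·
            by_cases h5 : (["config", "setting", ".env", "yml", "json"]).any (fun kw => PySem.Str.isIn kw (PySem.Str.lower b)) = true
            · simp at h1 h2 h3 h4 h5
              simp [pvStepA, pvCategory, pvTable, PySem.Dict.modify, pvIns_features, pvIns_fixes, pvIns_refactoring, pvIns_dependencies, pvIns_configuration, pvIns_documentation, pvIns_tests, pvIns_other, PySem.Dict.items_insert, PySem.Dict.getD_eq_get?_getD, PySem.Dict.get?_mk_cons, PySem.Dict.ext_iff, h1, h2, h3, h4, h5, ih]
            ·
              by_cases h6 : (["doc", "readme", "comment"]).any (fun kw => PySem.Str.isIn kw (PySem.Str.lower b)) = true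
              · simp at h1 h2 h3 h4 h5 h6
                simp [pvStepA, pvCategory, pvTable, PySem.Dict.modify, pvIns_features, pvIns_fixes, pvIns_refactoring, pvIns_dependencies, pvIns_configuration, pvIns_documentation, pvIns_tests, pvIns_other, PySem.Dict.items_insert, PySem.Dict.getD_eq_get?_getD, PySem.Dict.get?_mk_cons, PySem.Dict.ext_iff, h1, h2, h3, h4, h5, h6, ih]
              ·
                by_cases h7 : (["test", "spec", "mock"]).any (fun kw => PySem.Str.isIn kw (PySem.Str.lower b)) = true
                · simp at h1 h2 h3 h4 h5 h6 h7
                  simp [pvStepA, pvCategory, pvTable, PySem.Dict.modify, pvIns_features, pvIns_fixes, pvIns_refactoring, pvIns_dependencies, pvIns_configuration, pvIns_documentation, pvIns_tests, pvIns_other, PySem.Dict.items_insert, PySem.Dict.getD_eq_get?_getD, PySem.Dict.get?_mk_cons, PySem.Dict.ext_iff, h1, h2, h3, h4, h5, h6, h7, ih]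
                ·
                  · simp at h1 h2 h3 h4 h5 h6 h7
                    simp [pvStepA, pvCategory, pvTable, PySem.Dict.modify, pvIns_features, pvIns_fixes, pvIns_refactoring, pvIns_dependencies, pvIns_configuration, pvIns_documentation, pvIns_tests, pvIns_other, PySem.Dict.items_insert, PySem.Dict.getD_eq_get?_getD, PySem.Dict.get?_mk_cons, PySem.Dict.ext_iff, h1, h2, h3, h4, h5, h6, h7, ih]

-- ===== VERDICT (by name: the statement is the Claim_ definition above) =====
theorem group_bullet_points_py_spec : Claim_equal_group_bullet_points_py := by
  intro bullets _
  unfold Spec_group_bullet_points_py group_bullet_points_py group_bullet_points_py_alt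
  dsimp only
  rw [show (PySem.Dict.ofList
      [("features", ([] : List String)), ("fixes", []), ("refactoring", []), ("dependencies", []),
       ("configuration", []), ("documentation", []), ("tests", []), ("other", [])] : PySem.Dict String (List String)) =
      PySem.Dict.mk
      [("features", []), ("fixes", []), ("refactoring", []), ("dependencies", []),
       ("configuration", []), ("documentation", []), ("tests", []), ("other", [])] from by decide,
    pvLoopA]
  simp [PySem.Dict.items, pvTable, List.filter_map, List.map_map, Function.comp_def]
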